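-- pv_equiv track=rewrite | github.com/MrBrantCode/unitest_baseline | mut_generate/mist_train_cf/cf_55036/solution.py | word_anagram_frequency
-- ===== SOURCE A (Python) =====
-- from collections import Counter
--
-- def word_anagram_frequency(word_list, target_word):
--     target_word = target_word.lower()
--     word_list = [word.lower() for word in word_list]
--
--     def is_anagram(word1, word2):
--         return Counter(word1) == Counter(word2)
--
--     count = 0
--     for word in word_list:
--         if word == target_word or is_anagram(word, target_word):
--             count += 1
--
--     return count
-- ===== SOURCE B (Python) =====
-- def word_anagram_frequency(word_list, target_word):
--     target_key = ''.join(sorted(target_word.lower()))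
--     freq = {}
--     for word in word_list:
--         key = ''.join(sorted(word.lower()))
--         freq[key] = freq.get(key, 0) + 1
--     return freq.get(target_key, 0)
-- ===== Notes on version B (the rewrite author's own statement) =====
-- stated objective: faster
-- what changed: Replaces the per-word loop that rebuilds Counter(target) and compares dicts with a single pass building a frequency table keyed by each word's sorted lowercased letters, then one lookup of the target's key.
import Mathlib
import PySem

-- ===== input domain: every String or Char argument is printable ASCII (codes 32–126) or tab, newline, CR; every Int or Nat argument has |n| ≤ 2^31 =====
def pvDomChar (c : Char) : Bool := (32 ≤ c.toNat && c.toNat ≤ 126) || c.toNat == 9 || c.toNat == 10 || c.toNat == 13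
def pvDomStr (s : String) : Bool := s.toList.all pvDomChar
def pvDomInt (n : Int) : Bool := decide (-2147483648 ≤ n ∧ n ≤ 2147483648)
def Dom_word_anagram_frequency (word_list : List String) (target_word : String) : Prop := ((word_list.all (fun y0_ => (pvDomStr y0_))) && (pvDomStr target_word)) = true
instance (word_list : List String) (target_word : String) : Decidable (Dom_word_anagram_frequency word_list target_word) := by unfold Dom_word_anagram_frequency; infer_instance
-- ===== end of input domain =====

-- B replaces A's per-word Counter-equality scan with a one-pass frequency table of sorted-lowercase
-- canonical keys plus a single lookup (alternative decomposition, same asymptotic cost).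


-- ===== PORT A =====
-- Python dict '==' ignores insertion order: Counter(w1) == Counter(w2) is compared here as
-- "every key of each maps to the same count in both" (getD default 0; counter values are ≥ 1,
-- so a missing key is exactly getD = 0) — exact for counters.
def pyCounterEqB (c1 c2 : PySem.Dict Char Int) : Bool :=
  (c1.keys.all (fun k => c2.getD k 0 == c1.getD k 0)) &&
  (c2.keys.all (fun k => c1.getD k 0 == c2.getD k 0))

def pvIsAnagram (word1 word2 : String) : Bool :=
  pyCounterEqB (PySem.Dict.counter word1.toList) (PySem.Dict.counter word2.toList)

def word_anagram_frequency (word_list : List String) (target_word : String) : Int :=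
  let t := PySem.Str.lower target_word
  let ws := word_list.map PySem.Str.lower
  ws.foldl (fun count word => if word == t || pvIsAnagram word t then count + 1 else count) 0

-- ===== PORT B =====
-- ''.join(sorted(w.lower())) is ported as the sorted list of lowercased characters
-- (join of single characters is the same data; String keys ↔ List Char keys are in bijection).
def pvAnagramKey (w : String) : List Char :=
  PySem.List.sorted (PySem.Str.lower w).toList (fun c => c) false

def word_anagram_frequency_alt (word_list : List String) (target_word : String) : Int :=
  let targetKey := pvAnagramKey target_word
  let freq := word_list.foldl
    (fun d word => d.insert (pvAnagramKey word) (d.getD (pvAnagramKey word) 0 + 1))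
    PySem.Dict.empty
  freq.getD targetKey 0

-- ===== PRECONDITION & SPEC =====
def Spec_word_anagram_frequency (word_list : List String) (target_word : String) (out : Int) : Prop := out = word_anagram_frequency_alt word_list target_word
instance (word_list : List String) (target_word : String) (out : Int) : Decidable (Spec_word_anagram_frequency word_list target_word out) := by unfold Spec_word_anagram_frequency; infer_instance

-- ===== CLAIM (what is proved, stated in full; the proofs are below) =====
def Claim_equal_word_anagram_frequency : Prop := ∀ (word_list : List String) (target_word : String), Dom_word_anagram_frequency word_list target_word → Spec_word_anagram_frequency word_list target_word (word_anagram_frequency word_list target_word)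

-- ===== LEMMAS AND PROOFS =====

-- Counter equality (as Python dict ==) is exactly "same multiset of characters".
theorem pyCounterEqB_counter_iff_perm (l1 l2 : List Char) :
    pyCounterEqB (PySem.Dict.counter l1) (PySem.Dict.counter l2) = true ↔ l1.Perm l2 := by
  rw [List.perm_iff_count]
  simp only [pyCounterEqB, Bool.and_eq_true, List.all_eq_true, PySem.Dict.keys_counter,
    PySem.Dict.getD_counter, beq_iff_eq]
  constructor
  · rintro ⟨h1, h2⟩ c
    by_cases hc1 : c ∈ l1
    · have := h1 c ((PySem.Set.mem_ofList l1 c).mpr hc1)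
      exact_mod_cast this.symm
    · by_cases hc2 : c ∈ l2
      · have := h2 c ((PySem.Set.mem_ofList l2 c).mpr hc2)
        exact_mod_cast this
      · simp [List.count_eq_zero_of_not_mem hc1, List.count_eq_zero_of_not_mem hc2]
  · intro h
    refine ⟨fun c _ => ?_, fun c _ => ?_⟩
    · exact_mod_cast (h c).symm
    · exact_mod_cast h c

-- A's per-word test agrees with B's canonical-key test, word by word.
theorem pred_eq_key (w t : String) :
    (w == t || pvIsAnagram w t) =
      (PySem.List.sorted w.toList (fun c => c) false ==
       PySem.List.sorted t.toList (fun c => c) false) := by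
  by_cases hp : w.toList.Perm t.toList
  · have hk := (PySem.List.sorted_id_eq_sorted_id_iff_perm w.toList t.toList).mpr hp
    have ha := (pyCounterEqB_counter_iff_perm w.toList t.toList).mpr hp
    simp [pvIsAnagram, ha, hk]
  · have hk : ¬ (PySem.List.sorted w.toList (fun c => c) false =
        PySem.List.sorted t.toList (fun c => c) false) := fun h =>
      hp ((PySem.List.sorted_id_eq_sorted_id_iff_perm w.toList t.toList).mp h)
    have ha : pvIsAnagram w t = false := by
      cases h : pvIsAnagram w t
      · rfl
      · exact absurd ((pyCounterEqB_counter_iff_perm w.toList t.toList).mp h) hp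
    have hwt : (w == t) = false := by
      cases h : w == t
      · rfl
      · exact absurd (congrArg String.toList (eq_of_beq h) ▸ List.Perm.refl _) hp
    simp [ha, hwt, hk]

-- ===== VERDICT (by name: the statement is the Claim_ definition above) =====
theorem word_anagram_frequency_spec : Claim_equal_word_anagram_frequency := by
  intro word_list target_word _
  unfold Spec_word_anagram_frequency word_anagram_frequency word_anagram_frequency_alt
  dsimp only
  have hmap := List.foldl_map (f := pvAnagramKey)
    (g := fun (d : PySem.Dict (List Char) Int) k => d.insert k (d.getD k 0 + 1))
    (l := word_list) (init := PySem.Dict.empty)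
  rw [← hmap]
  rw [PySem.Dict.getD_foldl_insert_add_one, PySem.Dict.getD_empty,
    PySem.List.foldl_count_if, List.count_eq_countP, List.countP_map, List.countP_map]
  simp only [zero_add, Int.ofNat_inj]
  apply List.countP_congr
  intro w _
  simp only [Function.comp_apply, pred_eq_key, pvAnagramKey]
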